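-- pv_equiv track=rewrite | github.com/AlbertoRota/bot-2048-python | bot/fitness/fitness_2048.py | eval_smoothness
-- ===== SOURCE A (Python) =====
-- def eval_smoothness(grid):
--     grid_rows = len(grid)
--     grid_cols = len(grid[0])
--
--     score_smooth = 0
--     for x in range(grid_rows):
--         for y in range(grid_cols):
--             s = 99999999999
--             if x > 0:
--                 s = min(s, abs((grid[x][y] or 2) - (grid[x - 1][y] or 2)))
--             if y > 0:
--                 s = min(s, abs((grid[x][y] or 2) - (grid[x][y - 1] or 2)))
--             if x < grid_rows - 1:
--                 s = min(s, abs((grid[x][y] or 2) - (grid[x + 1][y] or 2)))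
--             if y < grid_cols - 1:
--                 s = min(s, abs((grid[x][y] or 2) - (grid[x][y + 1] or 2)))
--             score_smooth -= s
--     return score_smooth
-- ===== SOURCE B (Python) =====
-- def eval_smoothness(grid):
--     rows = len(grid)
--     cols = len(grid[0])
--     big = 99999999999
--     mins = {}
--     for x in range(rows):
--         for y in range(cols):
--             if y + 1 < cols:
--                 d = abs((grid[x][y] or 2) - (grid[x][y + 1] or 2))
--                 mins[(x, y)] = min(mins.get((x, y), big), d)
--                 mins[(x, y + 1)] = min(mins.get((x, y + 1), big), d)
--             if x + 1 < rows:
--                 d = abs((grid[x][y] or 2) - (grid[x + 1][y] or 2))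
--                 mins[(x, y)] = min(mins.get((x, y), big), d)
--                 mins[(x + 1, y)] = min(mins.get((x + 1, y), big), d)
--     return -sum(mins.get((x, y), big) for x in range(rows) for y in range(cols))
-- ===== Notes on version B (the rewrite author's own statement) =====
-- stated objective: alternative
-- what changed: Replaces A's per-cell scan with four directional boundary guards by a single edge-centric pass: each horizontal/vertical adjacency is visited once and relaxes a dictionary of per-cell minima at both of its endpoints, which is then summed (the sentinel survives for cells with no neighbour).
import Mathlib
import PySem

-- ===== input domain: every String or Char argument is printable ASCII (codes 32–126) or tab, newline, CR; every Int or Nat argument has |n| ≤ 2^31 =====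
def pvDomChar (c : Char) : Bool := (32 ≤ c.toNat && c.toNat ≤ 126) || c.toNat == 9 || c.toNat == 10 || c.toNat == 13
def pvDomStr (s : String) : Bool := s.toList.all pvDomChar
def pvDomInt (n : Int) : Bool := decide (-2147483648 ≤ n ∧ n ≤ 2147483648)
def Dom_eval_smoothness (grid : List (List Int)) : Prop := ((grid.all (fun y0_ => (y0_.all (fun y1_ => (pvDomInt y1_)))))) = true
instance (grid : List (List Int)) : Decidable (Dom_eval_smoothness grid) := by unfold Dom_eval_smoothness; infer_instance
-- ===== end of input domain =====

-- B replaces A's per-cell four-guard scan by one edge-centric pass relaxing a dictionary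
-- of per-cell minima at both endpoints of each adjacency (objective: alternative, same cost).

-- ===== PORT A =====
-- (grid[x][y] or 2): an int is falsy exactly when it is 0 (shared cell accessor; Source B inlines the same expression)
def pvCellA (grid : List (List Int)) (x y : Int) : Int :=
  let t := PySem.List.pyGetD (PySem.List.pyGetD grid x []) y 0
  if t = 0 then 2 else t

def eval_smoothness (grid : List (List Int)) : Int :=
  let grid_rows : Int := PySem.List.len grid
  let grid_cols : Int := PySem.List.len (PySem.List.pyGetD grid 0 [])
  (PySem.List.pyRange 0 grid_rows 1).foldl (fun score_smooth x =>
    (PySem.List.pyRange 0 grid_cols 1).foldl (fun score_smooth y =>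
      let s : Int := 99999999999
      let s := if x > 0 then min s |pvCellA grid x y - pvCellA grid (x - 1) y| else s
      let s := if y > 0 then min s |pvCellA grid x y - pvCellA grid x (y - 1)| else s
      let s := if x < grid_rows - 1 then min s |pvCellA grid x y - pvCellA grid (x + 1) y| else s
      let s := if y < grid_cols - 1 then min s |pvCellA grid x y - pvCellA grid x (y + 1)| else s
      score_smooth - s) score_smooth) 0

-- ===== PORT B =====
def eval_smoothness_alt (grid : List (List Int)) : Int :=
  let rows : Int := PySem.List.len grid
  let cols : Int := PySem.List.len (PySem.List.pyGetD grid 0 [])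
  let big : Int := 99999999999
  let mins : PySem.Dict (Int × Int) Int :=
    (PySem.List.pyRange 0 rows 1).foldl (fun m x =>
      (PySem.List.pyRange 0 cols 1).foldl (fun m y =>
        let m :=
          if y + 1 < cols then
            let d := |pvCellA grid x y - pvCellA grid x (y + 1)|
            let m := m.insert (x, y) (min (m.getD (x, y) big) d)
            m.insert (x, y + 1) (min (m.getD (x, y + 1) big) d)
          else m
        if x + 1 < rows then
          let d := |pvCellA grid x y - pvCellA grid (x + 1) y|
          let m := m.insert (x, y) (min (m.getD (x, y) big) d)
          m.insert (x + 1, y) (min (m.getD (x + 1, y) big) d)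
        else m) m) PySem.Dict.empty
  Neg.neg ((PySem.List.pyRange 0 rows 1).foldl (fun acc x =>
      (PySem.List.pyRange 0 cols 1).foldl (fun acc y =>
        acc + mins.getD (x, y) big) acc) 0)

-- ===== PRECONDITION & SPEC =====
-- Pre_: Python A raises IndexError on an empty grid and whenever some row is shorter than row 0.
def Pre_eval_smoothness (grid : List (List Int)) : Prop :=
  grid ≠ [] ∧ ∀ row ∈ grid, grid.headI.length ≤ row.length
instance (grid : List (List Int)) : Decidable (Pre_eval_smoothness grid) := by
  unfold Pre_eval_smoothness; infer_instance
def pvWitness_eval_smoothness : List (List Int) := [[2, 4], [4, 0]]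

def Spec_eval_smoothness (grid : List (List Int)) (out : Int) : Prop := out = eval_smoothness_alt grid
instance (grid : List (List Int)) (out : Int) : Decidable (Spec_eval_smoothness grid out) := by unfold Spec_eval_smoothness; infer_instance

-- ===== CLAIM (what is proved, stated in full; the proofs are below) =====
def Claim_equal_eval_smoothness : Prop := ∀ (grid : List (List Int)), Dom_eval_smoothness grid → Pre_eval_smoothness grid → Spec_eval_smoothness grid (eval_smoothness grid)

-- ===== LEMMAS AND PROOFS =====

-- the diff weight of an adjacency, and B's double relaxation at its endpoints
def pvDiff (g : List (List Int)) (e : (Int × Int) × (Int × Int)) : Int :=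
  |pvCellA g e.1.1 e.1.2 - pvCellA g e.2.1 e.2.2|

def pvStep (g : List (List Int)) (m : PySem.Dict (Int × Int) Int)
    (e : (Int × Int) × (Int × Int)) : PySem.Dict (Int × Int) Int :=
  let d := pvDiff g e
  let m := m.insert e.1 (min (m.getD e.1 99999999999) d)
  m.insert e.2 (min (m.getD e.2 99999999999) d)

-- all adjacencies, in the order Source B visits them
def pvEdges (R C : Int) : List ((Int × Int) × (Int × Int)) :=
  (PySem.List.pyRange 0 R 1).flatMap (fun x =>
    (PySem.List.pyRange 0 C 1).flatMap (fun y =>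
      (if y + 1 < C then [((x, y), (x, y + 1))] else []) ++
      (if x + 1 < R then [((x, y), (x + 1, y))] else [])))

lemma pv_foldl_sub {α : Type} (f : α → Int) (l : List α) (a : Int) :
    l.foldl (fun acc x => acc - f x) a = a - (l.map f).sum := by
  induction l generalizing a with
  | nil => simp
  | cons h t ih => simp [ih]; ring

lemma pv_getD_pvStep (g : List (List Int)) (m : PySem.Dict (Int × Int) Int)
    (e : (Int × Int) × (Int × Int)) (p : Int × Int) :
    (pvStep g m e).getD p 99999999999 =
      if p = e.1 ∨ p = e.2 then min (m.getD p 99999999999) (pvDiff g e)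
      else m.getD p 99999999999 := by
  simp only [pvStep, PySem.Dict.getD_insert]
  by_cases h2 : p = e.2
  · by_cases h12 : e.2 = e.1
    · rw [if_pos h2, if_pos h12, if_pos (Or.inr h2), h2, h12, min_assoc, min_self]
    · rw [if_pos h2, if_neg h12, if_pos (Or.inr h2), h2]
  · by_cases h1 : p = e.1
    · rw [if_neg h2, if_pos h1, if_pos (Or.inl h1), h1]
    · rw [if_neg h2, if_neg h1, if_neg (by tauto)]

lemma pv_getD_foldl_pvStep (g : List (List Int)) (p : Int × Int) :
    ∀ (es : List ((Int × Int) × (Int × Int))) (m : PySem.Dict (Int × Int) Int),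
    (es.foldl (pvStep g) m).getD p 99999999999 =
      es.foldl (fun a e => if p = e.1 ∨ p = e.2 then min a (pvDiff g e) else a)
        (m.getD p 99999999999) := by
  intro es
  induction es with
  | nil => intro m; rfl
  | cons e t ih => intro m; simp only [List.foldl_cons, ih, pv_getD_pvStep]

-- a flatMap over a range whose function vanishes off two points
lemma pv_flatMap_support2 {α : Type} (f : Int → List α) (b k1 k2 : Int) (hk : k1 < k2) :
    ∀ (n : Nat) (a : Int), (b - a).toNat = n →
    (∀ t, a ≤ t → t < b → t ≠ k1 → t ≠ k2 → f t = []) →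
    (PySem.List.pyRange a b 1).flatMap f =
      (if a ≤ k1 ∧ k1 < b then f k1 else []) ++ (if a ≤ k2 ∧ k2 < b then f k2 else []) := by
  intro n
  induction n with
  | zero =>
    intro a hn hs
    rw [PySem.List.pyRange_one_eq_nil (by omega)]
    rw [if_neg (by omega), if_neg (by omega)]
    rfl
  | succ n ih =>
    intro a hn hs
    have hab : a < b := by omega
    rw [PySem.List.pyRange_one_cons (by omega), List.flatMap_cons,
      ih (a + 1) (by omega) (fun t h1 h2 h3 h4 => hs t (by omega) h2 h3 h4)]
    by_cases ha1 : a = k1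
    · subst ha1
      split_ifs <;> first | (exfalso; omega) | simp
    · by_cases ha2 : a = k2
      · subst ha2
        split_ifs <;> first | (exfalso; omega) | simp
      · rw [hs a (le_refl a) hab ha1 ha2]
        split_ifs <;> first | (exfalso; omega) | simp

lemma pv_filter_if_singleton {α : Type} (P : α → Bool) (c : Prop) [Decidable c] (e : α) :
    (if c then [e] else []).filter P = if c ∧ P e then [e] else [] := by
  split_ifs with h1 h2 h2 <;> simp_all

lemma pv_foldl_if_singleton {α β : Type} (f : β → α → β) (c : Prop) [Decidable c]
    (e : α) (m : β) : (if c then [e] else []).foldl f m = if c then f m e else m := by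
  split_ifs <;> simp

-- the adjacencies incident to cell (x, y), in pvEdges order
lemma pv_filter_edges (R C x y : Int) (hx0 : 0 ≤ x) (hxR : x < R) (hy0 : 0 ≤ y) (hyC : y < C) :
    (pvEdges R C).filter (fun e => decide ((x, y) = e.1 ∨ (x, y) = e.2)) =
      (if 0 < x then [((x - 1, y), (x, y))] else []) ++
      (if 0 < y then [((x, y - 1), (x, y))] else []) ++
      ((if y + 1 < C then [((x, y), (x, y + 1))] else []) ++
       (if x + 1 < R then [((x, y), (x + 1, y))] else [])) := by
  unfold pvEdges
  simp only [List.filter_flatMap, List.filter_append, pv_filter_if_singleton,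
    decide_eq_true_eq, Prod.mk.injEq]
  rw [pv_flatMap_support2 _ R (x - 1) x (by omega) (R - 0).toNat 0 rfl (by
    intro t ht0 htR ht1 ht2
    rw [List.flatMap_eq_nil_iff]
    intro y' _
    rw [if_neg (by omega), if_neg (by omega)]
    rfl)]
  rw [pv_flatMap_support2 _ C y C (by omega) (C - 0).toNat 0 rfl (by
    intro t ht0 htC ht1 ht2
    rw [if_neg (by omega), if_neg (by omega)]
    rfl)]
  rw [pv_flatMap_support2 _ C (y - 1) y (by omega) (C - 0).toNat 0 rfl (by
    intro t ht0 htC ht1 ht2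
    rw [if_neg (by omega), if_neg (by omega)]
    rfl)]
  have hxx : x - 1 + 1 = x := by ring
  have hyy : y - 1 + 1 = y := by ring
  rw [hxx, hyy]
  simp only [true_and, and_true, true_or, or_true]
  rw [if_neg (show ¬(0 ≤ C ∧ C < C) from by omega),
    if_pos (show 0 ≤ x ∧ x < R from ⟨hx0, hxR⟩),
    if_pos (show 0 ≤ y ∧ y < C from ⟨hy0, hyC⟩),
    if_pos hxR, if_pos hyC,
    if_pos (show 0 ≤ y ∧ y < C from ⟨hy0, hyC⟩)]
  have d1 : ¬(y + 1 < C ∧ (x = x - 1 ∨ x = x - 1 ∧ y = y + 1)) := by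
    rintro ⟨-, h | ⟨h, -⟩⟩ <;> omega
  have d2 : ¬(x + 1 < R ∧ (y = y - 1 ∨ x = x + 1 ∧ y = y - 1)) := by
    rintro ⟨-, h | ⟨h, -⟩⟩ <;> omega
  rw [if_neg d1, if_neg d2]
  have e1 : (0 ≤ x - 1 ∧ x - 1 < R) ↔ 0 < x := by omega
  have e2 : (0 ≤ y - 1 ∧ y - 1 < C) ↔ 0 < y := by omega
  simp only [e1, e2, List.append_nil, List.nil_append]
  simp [List.append_assoc]

lemma pv_cell_min (g : List (List Int)) (R C x y : Int)
    (hx0 : 0 ≤ x) (hxR : x < R) (hy0 : 0 ≤ y) (hyC : y < C) :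
    ((pvEdges R C).foldl (pvStep g) PySem.Dict.empty).getD (x, y) 99999999999 =
      (let s : Int := 99999999999
       let s := if x > 0 then min s |pvCellA g x y - pvCellA g (x - 1) y| else s
       let s := if y > 0 then min s |pvCellA g x y - pvCellA g x (y - 1)| else s
       let s := if x < R - 1 then min s |pvCellA g x y - pvCellA g (x + 1) y| else s
       if y < C - 1 then min s |pvCellA g x y - pvCellA g x (y + 1)| else s) := by
  rw [pv_getD_foldl_pvStep, PySem.Dict.getD_empty,
    PySem.List.foldl_ite_eq_foldl_filter, pv_filter_edges R C x y hx0 hxR hy0 hyC]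
  simp only [List.foldl_append, pv_foldl_if_singleton, pvDiff]
  have h1 : |pvCellA g (x - 1) y - pvCellA g x y| = |pvCellA g x y - pvCellA g (x - 1) y| :=
    abs_sub_comm _ _
  have h2 : |pvCellA g x (y - 1) - pvCellA g x y| = |pvCellA g x y - pvCellA g x (y - 1)| :=
    abs_sub_comm _ _
  rw [h1, h2]
  generalize |pvCellA g x y - pvCellA g (x - 1) y| = dU
  generalize |pvCellA g x y - pvCellA g x (y - 1)| = dL
  generalize |pvCellA g x y - pvCellA g (x + 1) y| = dD
  generalize |pvCellA g x y - pvCellA g x (y + 1)| = dR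
  split_ifs <;> omega

-- Source B's nested relaxation loop is the fold of pvStep over pvEdges
lemma pv_mins_eq (g : List (List Int)) (R C : Int) :
    (PySem.List.pyRange 0 R 1).foldl (fun m x =>
      (PySem.List.pyRange 0 C 1).foldl (fun m y =>
        let m :=
          if y + 1 < C then
            let d := |pvCellA g x y - pvCellA g x (y + 1)|
            let m := m.insert (x, y) (min (m.getD (x, y) 99999999999) d)
            m.insert (x, y + 1) (min (m.getD (x, y + 1) 99999999999) d)
          else m
        if x + 1 < R then
          let d := |pvCellA g x y - pvCellA g (x + 1) y|
          let m := m.insert (x, y) (min (m.getD (x, y) 99999999999) d)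
          m.insert (x + 1, y) (min (m.getD (x + 1, y) 99999999999) d)
        else m) m) PySem.Dict.empty
    = (pvEdges R C).foldl (pvStep g) PySem.Dict.empty := by
  rw [pvEdges, List.foldl_flatMap]
  congr 1
  funext m x
  rw [List.foldl_flatMap]
  congr 1
  funext m y
  rw [List.foldl_append, pv_foldl_if_singleton, pv_foldl_if_singleton]
  simp only [pvStep, pvDiff]

-- the same cell characterisation, stated for Source B's own loop
lemma pv_cell_min_alt (g : List (List Int)) (R C x y : Int)
    (hx0 : 0 ≤ x) (hxR : x < R) (hy0 : 0 ≤ y) (hyC : y < C) :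
    ((PySem.List.pyRange 0 R 1).foldl (fun m x =>
      (PySem.List.pyRange 0 C 1).foldl (fun m y =>
        let m :=
          if y + 1 < C then
            let d := |pvCellA g x y - pvCellA g x (y + 1)|
            let m := m.insert (x, y) (min (m.getD (x, y) 99999999999) d)
            m.insert (x, y + 1) (min (m.getD (x, y + 1) 99999999999) d)
          else m
        if x + 1 < R then
          let d := |pvCellA g x y - pvCellA g (x + 1) y|
          let m := m.insert (x, y) (min (m.getD (x, y) 99999999999) d)
          m.insert (x + 1, y) (min (m.getD (x + 1, y) 99999999999) d)
        else m) m) PySem.Dict.empty).getD (x, y) 99999999999 =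
      (let s : Int := 99999999999
       let s := if x > 0 then min s |pvCellA g x y - pvCellA g (x - 1) y| else s
       let s := if y > 0 then min s |pvCellA g x y - pvCellA g x (y - 1)| else s
       let s := if x < R - 1 then min s |pvCellA g x y - pvCellA g (x + 1) y| else s
       if y < C - 1 then min s |pvCellA g x y - pvCellA g x (y + 1)| else s) := by
  rw [pv_mins_eq]
  exact pv_cell_min g R C x y hx0 hxR hy0 hyC

-- ===== VERDICT (by name: the statement is the Claim_ definition above) =====
theorem eval_smoothness_spec : Claim_equal_eval_smoothness := by
  intro grid _ _
  unfold Spec_eval_smoothness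
  simp only [eval_smoothness, eval_smoothness_alt, pv_foldl_sub, PySem.List.foldl_add]
  rw [zero_sub, zero_add]
  congr 1
  refine congrArg List.sum ?_
  apply List.map_congr_left
  intro x hx
  refine congrArg List.sum ?_
  apply List.map_congr_left
  intro y hy
  have hxb := PySem.List.mem_pyRange_one.mp hx
  have hyb := PySem.List.mem_pyRange_one.mp hy
  exact (pv_cell_min_alt grid _ _ x y hxb.1 hxb.2 hyb.1 hyb.2).symm
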